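-- pv_equiv track=rewrite | github.com/braydeck/6PartySystem | stv_step1.py | partition_seats
-- ===== SOURCE A (Python) =====
-- def partition_seats(total: int) -> list:
--     """
--     Partition total seats into district sizes.
--
--     Rules:
--     - total <= 4: single at-large district of that size
--     - Otherwise: find combination of 5s, 7s, and 3s such that:
--         Primary objective:   minimize number of 3-seat districts
--         Secondary objective: minimize number of 7-seat districts
--     - 2-seat and 4-seat districts are ONLY for states with exactly 2 or 4 seats.
--     """
--     if total <= 4:
--         return [total]
--
--     best_n3  = None
--     best_n7  = None
--     best     = None
--
--     for n7 in range(total // 7 + 1):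
--         rem = total - 7 * n7
--         for n5 in range(rem // 5 + 1):
--             rem2 = rem - 5 * n5
--             if rem2 == 0:
--                 n3 = 0
--             elif rem2 % 3 == 0:
--                 n3 = rem2 // 3
--             else:
--                 continue
--             # Primary: minimize n3; secondary: minimize n7
--             if best is None or (n3, n7) < (best_n3, best_n7):
--                 best_n3, best_n7 = n3, n7
--                 best = (n5, n7, n3)
--
--     if best is None:
--         # Fallback: should not happen for total >= 5, but guard anyway
--         # Break into 3s + leftover
--         n3 = total // 3
--         leftover = total % 3
--         sizes = [3] * n3
--         if leftover:
--             sizes.append(leftover)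
--         return sorted(sizes, reverse=True)
--
--     n5, n7, n3 = best
--     return sorted([5] * n5 + [7] * n7 + [3] * n3, reverse=True)
-- ===== SOURCE B (Python) =====
-- def partition_seats(total: int) -> list:
--     # Faster: scan n3 ascending; for each remainder the minimal n7 (if any) lies in 0..4,
--     # so the first hit is the lexicographically minimal (n3, n7).
--     if total <= 4:
--         return [total]
--     n3 = 0
--     while 3 * n3 <= total:
--         r = total - 3 * n3
--         for n7 in range(5):
--             if 7 * n7 <= r and (r - 7 * n7) % 5 == 0:
--                 n5 = (r - 7 * n7) // 5
--                 return [7] * n7 + [5] * n5 + [3] * n3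
--         n3 += 1
--     return []  # unreachable for total >= 5
-- ===== Notes on version B (the rewrite author's own statement) =====
-- stated objective: faster
-- what changed: A enumerates every (n7, n5) pair up to total, keeping a lexicographic running best; B scans n3 ascending and, per remainder, finds the minimal n7 by a constant 0..4 divisibility check (the minimal valid n7 mod 5 argument), returning at the first hit.
import Mathlib
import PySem

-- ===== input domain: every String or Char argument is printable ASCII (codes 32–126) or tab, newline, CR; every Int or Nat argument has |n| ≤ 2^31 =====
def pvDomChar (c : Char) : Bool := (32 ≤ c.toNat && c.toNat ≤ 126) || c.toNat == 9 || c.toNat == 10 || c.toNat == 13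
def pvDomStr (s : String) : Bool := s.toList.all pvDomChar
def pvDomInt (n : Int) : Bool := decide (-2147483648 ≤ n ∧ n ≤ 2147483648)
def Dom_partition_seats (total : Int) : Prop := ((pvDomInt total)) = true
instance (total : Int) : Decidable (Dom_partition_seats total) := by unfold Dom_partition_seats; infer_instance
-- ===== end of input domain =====

-- B replaces A's quadratic search over all (n7, n5) pairs by an ascending scan of n3
-- with an O(1) minimal-n7 check per step (the minimal valid n7 always lies in 0..4): faster.

-- ===== PORT A =====
-- Python's `(n3, n7) < (best_n3, best_n7)` update of the running best triple
def aUpd (best : Option (Int × Int × Int)) (n5 n7 n3 : Int) : Option (Int × Int × Int) :=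
  match best with
  | none => some (n5, n7, n3)
  | some (b5, b7, b3) =>
    if n3 < b3 ∨ (n3 = b3 ∧ n7 < b7) then some (n5, n7, n3) else some (b5, b7, b3)

def partition_seats (total : Int) : List Int :=
  if total ≤ 4 then [total]
  else
    let best :=
      (PySem.List.pyRange 0 (PySem.Int.floordiv total 7 + 1) 1).foldl
        (fun best n7 =>
          let rem := total - 7 * n7
          (PySem.List.pyRange 0 (PySem.Int.floordiv rem 5 + 1) 1).foldl
            (fun best n5 =>
              let rem2 := rem - 5 * n5
              if rem2 = 0 then aUpd best n5 n7 0
              else if PySem.Int.mod rem2 3 = 0 then aUpd best n5 n7 (PySem.Int.floordiv rem2 3)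
              else best)
            best)
        none
    match best with
    | none =>
      -- fallback: break into 3s + leftover
      let n3 := PySem.Int.floordiv total 3
      let leftover := PySem.Int.mod total 3
      let sizes := List.replicate n3.toNat 3
      let sizes := if leftover ≠ 0 then sizes ++ [leftover] else sizes
      PySem.List.sorted sizes (fun x => x) true
    | some (n5, n7, n3) =>
      PySem.List.sorted
        (List.replicate n5.toNat 5 ++ List.replicate n7.toNat 7 ++ List.replicate n3.toNat 3)
        (fun x => x) true

-- ===== PORT B =====
-- `for n7 in range(5): if 7*n7 <= r and (r - 7*n7) % 5 == 0: ...` (first hit)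
def findSeven (r : Int) (n7 : Int) : Nat → Option Int
  | 0 => none
  | left + 1 =>
    if 7 * n7 ≤ r ∧ PySem.Int.mod (r - 7 * n7) 5 = 0 then some n7
    else findSeven r (n7 + 1) left

-- the `while 3 * n3 <= total` loop; fuel bounds the iteration count (loop adds 1 to n3 each round)
def bLoop (total : Int) (n3 : Int) : Nat → List Int
  | 0 => []
  | fuel + 1 =>
    if 3 * n3 ≤ total then
      match findSeven (total - 3 * n3) 0 5 with
      | some n7 =>
        let n5 := PySem.Int.floordiv (total - 3 * n3 - 7 * n7) 5
        List.replicate n7.toNat 7 ++ List.replicate n5.toNat 5 ++ List.replicate n3.toNat 3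
      | none => bLoop total (n3 + 1) fuel
    else []

def partition_seats_alt (total : Int) : List Int :=
  if total ≤ 4 then [total] else bLoop total 0 (total.toNat + 1)

-- ===== PRECONDITION & SPEC =====
def Spec_partition_seats (total : Int) (out : List Int) : Prop := out = partition_seats_alt total
instance (total : Int) (out : List Int) : Decidable (Spec_partition_seats total out) := by unfold Spec_partition_seats; infer_instance

-- ===== CLAIM (what is proved, stated in full; the proofs are below) =====
def Claim_equal_partition_seats : Prop := ∀ (total : Int), Dom_partition_seats total → Spec_partition_seats total (partition_seats total)

-- ===== LEMMAS AND PROOFS =====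

def candPV (total n7 n5 : Int) : Option (Int × Int × Int) :=
  if PySem.Int.mod (total - 7 * n7 - 5 * n5) 3 = 0 then
    some (n5, n7, PySem.Int.floordiv (total - 7 * n7 - 5 * n5) 3)
  else none

def stepPV (total : Int) (b : Option (Int × Int × Int)) (p : Int × Int) : Option (Int × Int × Int) :=
  match candPV total p.1 p.2 with
  | none => b
  | some t => aUpd b t.1 t.2.1 t.2.2

def eventsPV (total : Int) : List (Int × Int) :=
  (PySem.List.pyRange 0 (PySem.Int.floordiv total 7 + 1) 1).flatMap
    (fun n7 => (PySem.List.pyRange 0 (PySem.Int.floordiv (total - 7 * n7) 5 + 1) 1).map (fun n5 => (n7, n5)))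

-- strict order on the (n3, n7) key of a triple (n5, n7, n3)
def keyLt (t s : Int × Int × Int) : Prop :=
  t.2.2 < s.2.2 ∨ (t.2.2 = s.2.2 ∧ t.2.1 < s.2.1)

theorem A_inner_eq (total n7 : Int) :
    (fun (best : Option (Int × Int × Int)) (n5 : Int) =>
      if total - 7 * n7 - 5 * n5 = 0 then aUpd best n5 n7 0
      else if PySem.Int.mod (total - 7 * n7 - 5 * n5) 3 = 0 then
        aUpd best n5 n7 (PySem.Int.floordiv (total - 7 * n7 - 5 * n5) 3)
      else best)
      = (fun b n5 => stepPV total b (n7, n5)) := by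
  funext b n5
  by_cases h : total - 7 * n7 - 5 * n5 = 0
  · rw [if_pos h]
    simp only [stepPV, candPV, h]
    norm_num
  · rw [if_neg h]
    simp only [stepPV, candPV]
    split <;> rfl

theorem sorted_rev_two (m n : Nat) :
    PySem.List.sorted (List.replicate m (5:Int) ++ List.replicate n 7) (fun x => x) true
      = List.replicate n (7:Int) ++ List.replicate m 5 := by
  refine List.Perm.eq_of_pairwise (le := fun a b : Int => b ≤ a)
    (fun a b _ _ h1 h2 => le_antisymm h2 h1) ?_ ?_
    ((PySem.List.sorted_perm _ _ _).trans List.perm_append_comm)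
  · exact PySem.List.sorted_pairwise_rev _ _
  · simp only [List.pairwise_append]
    refine ⟨List.pairwise_replicate.mpr ?_, List.pairwise_replicate.mpr ?_, ?_⟩
    · exact Or.inr le_rfl
    · exact Or.inr le_rfl
    · intro a ha b hb
      rw [List.eq_of_mem_replicate ha, List.eq_of_mem_replicate hb]
      norm_num

theorem stepPV_keep (total : Int) (t0 : Int × Int × Int) (p : Int × Int)
    (hspec : ∀ t, candPV total p.1 p.2 = some t → t = t0 ∨ keyLt t0 t) :
    stepPV total (some t0) p = some t0 := by
  unfold stepPV
  rcases hc : candPV total p.1 p.2 with _ | t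
  · rfl
  · rcases hspec t hc with rfl | ht
    · obtain ⟨x5, x7, x3⟩ := t
      simp only [aUpd]
      rw [if_neg (by omega)]
    · obtain ⟨x5, x7, x3⟩ := t0
      obtain ⟨a5, a7, a3⟩ := t
      simp only [aUpd]
      simp only [keyLt] at ht
      rw [if_neg (by omega)]

theorem foldl_min (total : Int) (t0 : Int × Int × Int) :
    ∀ (l : List (Int × Int)) (b : Option (Int × Int × Int)),
    (∀ p ∈ l, ∀ t, candPV total p.1 p.2 = some t → t = t0 ∨ keyLt t0 t) →
    (b = none ∨ b = some t0 ∨ ∃ tb, b = some tb ∧ keyLt t0 tb) →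
    ((∃ p ∈ l, candPV total p.1 p.2 = some t0) ∨ b = some t0) →
    l.foldl (stepPV total) b = some t0 := by
  intro l
  induction l with
  | nil =>
    intro b _ _ hm
    rcases hm with ⟨p, hp, _⟩ | hb
    · exact absurd hp (List.not_mem_nil)
    · simpa using hb
  | cons p l ih =>
    intro b h1 hb hm
    simp only [List.foldl_cons]
    have hstep : stepPV total b p = some t0 ∨
        (stepPV total b p = b ∧ candPV total p.1 p.2 ≠ some t0) ∨
        (∃ tb, stepPV total b p = some tb ∧ keyLt t0 tb ∧ candPV total p.1 p.2 ≠ some t0) := by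
      unfold stepPV
      rcases hc : candPV total p.1 p.2 with _ | t
      · exact Or.inr (Or.inl ⟨rfl, by simp⟩)
      · obtain ⟨a5, a7, a3⟩ := t
        rcases h1 p (List.mem_cons_self) _ hc with ht | ht
        · -- this candidate IS t0
          subst ht
          rcases hb with rfl | rfl | ⟨tb, rfl, htb⟩
          · exact Or.inl rfl
          · left
            simp only [aUpd]
            split <;> rfl
          · left
            obtain ⟨b5, b7, b3⟩ := tb
            simp only [aUpd]
            rw [if_pos]
            rcases htb with h | ⟨h, h'⟩
            · exact Or.inl h
            · exact Or.inr ⟨h, h'⟩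
        · -- strictly worse than t0
          have hne : some (a5, a7, a3) ≠ some t0 := by
            intro hcontra
            obtain ⟨rfl⟩ := Option.some.inj hcontra
            rcases ht with h | ⟨h, h'⟩ <;> simp_all [keyLt]
          rcases hb with rfl | rfl | ⟨tb, rfl, htb⟩
          · exact Or.inr (Or.inr ⟨(a5, a7, a3), rfl, ht, fun h => hne (hc ▸ h)⟩)
          · right; left
            refine ⟨?_, fun h => hne (hc ▸ h)⟩
            obtain ⟨x5, x7, x3⟩ := t0
            simp only [aUpd]
            simp only [keyLt] at ht
            rw [if_neg (by omega)]
          · right; right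
            obtain ⟨b5, b7, b3⟩ := tb
            simp only [aUpd]
            split
            · exact ⟨(a5, a7, a3), rfl, ht, fun h => hne (hc ▸ h)⟩
            · exact ⟨(b5, b7, b3), rfl, htb, fun h => hne (hc ▸ h)⟩
    have h1' : ∀ q ∈ l, ∀ t, candPV total q.1 q.2 = some t → t = t0 ∨ keyLt t0 t :=
      fun q hq => h1 q (List.mem_cons_of_mem _ hq)
    rcases hstep with hs | ⟨hs, hne⟩ | ⟨tb, hs, htb, hne⟩
    · rw [hs]
      exact ih (some t0) h1' (Or.inr (Or.inl rfl)) (Or.inr rfl)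
    · rw [hs]
      refine ih b h1' hb ?_
      rcases hm with ⟨q, hq, hcq⟩ | hbt
      · rcases List.mem_cons.mp hq with rfl | hq'
        · exact absurd hcq hne
        · exact Or.inl ⟨q, hq', hcq⟩
      · exact Or.inr hbt
    · rw [hs]
      refine ih (some tb) h1' (Or.inr (Or.inr ⟨tb, rfl, htb⟩)) ?_
      rcases hm with ⟨q, hq, hcq⟩ | hbt
      · rcases List.mem_cons.mp hq with rfl | hq'
        · exact absurd hcq hne
        · exact Or.inl ⟨q, hq', hcq⟩
      · exfalso
        rw [hbt, stepPV_keep total t0 p (h1 p List.mem_cons_self)] at hs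
        obtain ⟨rfl⟩ := Option.some.inj hs
        obtain ⟨x5, x7, x3⟩ := t0
        simp only [keyLt] at htb
        omega

theorem findSeven_ge28 (total : Int) (h : 28 ≤ total) :
    findSeven total 0 5 = some ((3 * total) % 5) := by
  have h5 : (0:Int) < 5 := by norm_num
  simp only [findSeven, PySem.Int.mod_eq_emod_of_pos h5]
  have : total % 5 = 0 ∨ total % 5 = 1 ∨ total % 5 = 2 ∨ total % 5 = 3 ∨ total % 5 = 4 := by omega
  rcases this with h5' | h5' | h5' | h5' | h5'
  · rw [show (3 * total) % 5 = 0 by omega]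
    rw [if_pos ⟨by omega, by omega⟩]
  · rw [show (3 * total) % 5 = 3 by omega]
    rw [if_neg (by omega), if_neg (by omega), if_neg (by omega), if_pos ⟨by omega, by omega⟩]
    norm_num
  · rw [show (3 * total) % 5 = 1 by omega]
    rw [if_neg (by omega), if_pos ⟨by omega, by omega⟩]
    norm_num
  · rw [show (3 * total) % 5 = 4 by omega]
    rw [if_neg (by omega), if_neg (by omega), if_neg (by omega), if_neg (by omega),
        if_pos ⟨by omega, by omega⟩]
    norm_num
  · rw [show (3 * total) % 5 = 2 by omega]
    rw [if_neg (by omega), if_neg (by omega), if_pos ⟨by omega, by omega⟩]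
    norm_num

theorem B_ge28 (total : Int) (h : 28 ≤ total) :
    partition_seats_alt total
      = List.replicate ((3 * total) % 5).toNat 7
        ++ List.replicate ((total - 7 * ((3 * total) % 5)) / 5).toNat 5 := by
  unfold partition_seats_alt
  rw [if_neg (by omega)]
  obtain ⟨n, hn⟩ : ∃ n : Nat, total.toNat + 1 = n + 1 := ⟨total.toNat, rfl⟩
  rw [hn]
  simp only [bLoop]
  rw [if_pos (by omega)]
  rw [show total - 3 * 0 = total by ring, findSeven_ge28 total h]
  simp only []
  rw [PySem.Int.floordiv_eq_ediv_of_pos (by norm_num)]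
  norm_num

theorem foldl_flatMap_pairs {σ : Type} (l : List Int) (g : Int → List Int)
    (h : σ → Int → Int → σ) (init : σ) :
    l.foldl (fun b x => (g x).foldl (fun b y => h b x y) b) init
      = (l.flatMap (fun x => (g x).map (fun y => (x, y)))).foldl (fun b p => h b p.1 p.2) init := by
  induction l generalizing init with
  | nil => rfl
  | cons x l ih => simp only [List.flatMap_cons, List.foldl_append, List.foldl_map, List.foldl_cons, ih]

theorem A_ge28 (total : Int) (h : 28 ≤ total) :
    partition_seats total
      = List.replicate ((3 * total) % 5).toNat 7
        ++ List.replicate ((total - 7 * ((3 * total) % 5)) / 5).toNat 5 := by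
  have h7 : (0:Int) < 7 := by norm_num
  have h5 : (0:Int) < 5 := by norm_num
  have h3 : (0:Int) < 3 := by norm_num
  set b0 : Int := (3 * total) % 5 with hb0
  set a0 : Int := (total - 7 * b0) / 5 with ha0
  have hdvd : total - 7 * b0 - 5 * a0 = 0 := by omega
  have hcand : candPV total b0 a0 = some (a0, b0, 0) := by
    unfold candPV
    rw [hdvd]
    rw [PySem.Int.mod_eq_emod_of_pos h3, PySem.Int.floordiv_eq_ediv_of_pos h3]
    norm_num
  have hmem : (b0, a0) ∈ eventsPV total := by
    simp only [eventsPV, List.mem_flatMap, List.mem_map, PySem.List.mem_pyRange_one,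
      PySem.Int.floordiv_eq_ediv_of_pos h7, PySem.Int.floordiv_eq_ediv_of_pos h5]
    exact ⟨b0, ⟨by omega, by omega⟩, a0, ⟨by omega, by omega⟩, rfl⟩
  have H1 : ∀ p ∈ eventsPV total, ∀ t, candPV total p.1 p.2 = some t →
      t = (a0, b0, 0) ∨ keyLt (a0, b0, 0) t := by
    intro p hp t hc
    simp only [eventsPV, List.mem_flatMap, List.mem_map, PySem.List.mem_pyRange_one,
      PySem.Int.floordiv_eq_ediv_of_pos h7, PySem.Int.floordiv_eq_ediv_of_pos h5] at hp
    obtain ⟨n7, ⟨hn7a, hn7b⟩, n5, ⟨hn5a, hn5b⟩, rfl⟩ := hp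
    unfold candPV at hc
    rw [PySem.Int.mod_eq_emod_of_pos h3, PySem.Int.floordiv_eq_ediv_of_pos h3] at hc
    split_ifs at hc with hmod
    · obtain ⟨rfl⟩ := Option.some.inj hc
      simp only [keyLt, Prod.mk.injEq]
      by_cases hk : (total - 7 * n7 - 5 * n5) / 3 = 0 ∧ n7 = b0
      · left
        refine ⟨by omega, hk.2, hk.1⟩
      · right
        push Not at hk
        have hrem : 0 ≤ total - 7 * n7 - 5 * n5 := by omega
        have hq0 : 0 ≤ (total - 7 * n7 - 5 * n5) / 3 := by omega
        by_cases hzf : total - 7 * n7 - 5 * n5 = 0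
        · have hmod5 : n7 % 5 = b0 := by omega
          have hble : b0 ≤ n7 := by omega
          have hne : n7 ≠ b0 := hk (by omega)
          exact Or.inr ⟨by omega, by omega⟩
        · exact Or.inl (by omega)
  have hfold :
      (PySem.List.pyRange 0 (PySem.Int.floordiv total 7 + 1) 1).foldl
        (fun best n7 =>
          (PySem.List.pyRange 0 (PySem.Int.floordiv (total - 7 * n7) 5 + 1) 1).foldl
            (fun best n5 =>
              if total - 7 * n7 - 5 * n5 = 0 then aUpd best n5 n7 0
              else if PySem.Int.mod (total - 7 * n7 - 5 * n5) 3 = 0 then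
                aUpd best n5 n7 (PySem.Int.floordiv (total - 7 * n7 - 5 * n5) 3)
              else best)
            best)
        none = some (a0, b0, 0) := by
    have hstep : ∀ n7 : Int,
        (fun (best : Option (Int × Int × Int)) (n5 : Int) =>
          if total - 7 * n7 - 5 * n5 = 0 then aUpd best n5 n7 0
          else if PySem.Int.mod (total - 7 * n7 - 5 * n5) 3 = 0 then
            aUpd best n5 n7 (PySem.Int.floordiv (total - 7 * n7 - 5 * n5) 3)
          else best) = (fun b n5 => stepPV total b (n7, n5)) := fun n7 => A_inner_eq total n7
    calc (PySem.List.pyRange 0 (PySem.Int.floordiv total 7 + 1) 1).foldl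
          (fun best n7 =>
            (PySem.List.pyRange 0 (PySem.Int.floordiv (total - 7 * n7) 5 + 1) 1).foldl
              (fun best n5 =>
                if total - 7 * n7 - 5 * n5 = 0 then aUpd best n5 n7 0
                else if PySem.Int.mod (total - 7 * n7 - 5 * n5) 3 = 0 then
                  aUpd best n5 n7 (PySem.Int.floordiv (total - 7 * n7 - 5 * n5) 3)
                else best)
              best)
          none
        = (PySem.List.pyRange 0 (PySem.Int.floordiv total 7 + 1) 1).foldl
          (fun best n7 =>
            (PySem.List.pyRange 0 (PySem.Int.floordiv (total - 7 * n7) 5 + 1) 1).foldl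
              (fun b n5 => stepPV total b (n7, n5)) best)
          none := by
          apply PySem.List.foldl_congr_mem
          intro acc x _
          rw [hstep x]
      _ = (eventsPV total).foldl (stepPV total) none := by
          rw [foldl_flatMap_pairs
            (PySem.List.pyRange 0 (PySem.Int.floordiv total 7 + 1) 1)
            (fun n7 => PySem.List.pyRange 0 (PySem.Int.floordiv (total - 7 * n7) 5 + 1) 1)
            (fun b x y => stepPV total b (x, y)) none]
          rfl
      _ = some (a0, b0, 0) :=
          foldl_min total (a0, b0, 0) (eventsPV total) none H1 (Or.inl rfl)
            (Or.inl ⟨(b0, a0), hmem, hcand⟩)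
  unfold partition_seats
  rw [if_neg (by omega)]
  simp only []
  rw [hfold]
  simp only [Int.toNat_zero, List.replicate_zero, List.append_nil]
  exact sorted_rev_two _ _

theorem mid_range (total : Int) (h1 : 5 ≤ total) (h2 : total ≤ 27) :
    partition_seats total = partition_seats_alt total := by
  interval_cases total <;> decide

-- ===== VERDICT (by name: the statement is the Claim_ definition above) =====
theorem partition_seats_spec : Claim_equal_partition_seats := by
  intro total _
  unfold Spec_partition_seats
  rcases (show total ≤ 4 ∨ 4 < total by omega) with h | h
  · unfold partition_seats partition_seats_alt
    rw [if_pos h, if_pos h]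
  · rcases (show total ≤ 27 ∨ 27 < total by omega) with h2 | h2
    · exact mid_range total (by omega) h2
    · rw [A_ge28 total (by omega), B_ge28 total (by omega)]
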